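-- pv_equiv track=rewrite | github.com/Michal0ss/WDI | WDI_algo/Kolosy_poprawkowe/23/5A_Again.py | eight
-- ===== SOURCE A (Python) =====
-- def eight(n):
--     tab=[0,0,0,0,0,0,0,0]
--     while n>0:
--         div = n%8
--         tab[div]+=1
--         if tab[div]>1:
--             return False
--         n=n//8
--     return True
-- ===== SOURCE B (Python) =====
-- def eight(n):
--     # n's octal digits are all distinct iff the lowest digit does not occur
--     # anywhere in n//8's digits, recursively for every suffix.
--     def occurs(d, m):
--         while m > 0:
--             if m % 8 == d:
--                 return True
--             m //= 8
--         return False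
--     if n <= 0:
--         return True
--     return (not occurs(n % 8, n // 8)) and eight(n // 8)
-- ===== Notes on version B (the rewrite author's own statement) =====
-- stated objective: alternative
-- what changed: B replaces A's fixed-size digit-counting array with a recursive pairwise check: for each octal digit it scans the remaining quotient's digits for a repeat (nested brute-force membership scan instead of a frequency table).
import Mathlib
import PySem

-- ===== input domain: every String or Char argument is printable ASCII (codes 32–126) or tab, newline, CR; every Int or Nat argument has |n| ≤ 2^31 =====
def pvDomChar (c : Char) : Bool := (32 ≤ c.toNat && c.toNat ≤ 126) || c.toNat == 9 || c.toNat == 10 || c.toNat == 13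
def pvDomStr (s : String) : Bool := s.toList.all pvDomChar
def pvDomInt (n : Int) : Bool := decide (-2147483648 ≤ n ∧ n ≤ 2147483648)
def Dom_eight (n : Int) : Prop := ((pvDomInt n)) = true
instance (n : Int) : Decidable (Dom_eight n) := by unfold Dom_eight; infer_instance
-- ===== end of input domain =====

-- B replaces A's counting array with a recursive pairwise check: each octal digit is
-- scanned for in the remaining quotient's digits (objective: alternative algorithm).

-- ===== PORT A =====
-- the loop index div = n % 8 is always in [0, 8) while n > 0, so tab[div] is the
-- in-range access tab.getD div.toNat (exact for Python's tab[div])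
def eightLoop (tab : List Int) (n : Int) : Bool :=
  if n > 0 then
    -- div = n % 8; tab[div] += 1 (div and the updated table written inline)
    if (tab.set (PySem.Int.mod n 8).toNat (tab.getD (PySem.Int.mod n 8).toNat 0 + 1)).getD
        (PySem.Int.mod n 8).toNat 0 > 1 then false
    else eightLoop (tab.set (PySem.Int.mod n 8).toNat (tab.getD (PySem.Int.mod n 8).toNat 0 + 1))
        (PySem.Int.floordiv n 8)
  else true
termination_by n.toNat
decreasing_by
  simp only [PySem.Int.floordiv]
  rw [Int.fdiv_eq_ediv]; simp only [show ((0:Int) ≤ 8 ∨ (8:Int) ∣ _) from Or.inl (by norm_num), if_pos]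
  omega

def eight (n : Int) : Bool := eightLoop [0,0,0,0,0,0,0,0] n

-- ===== PORT B =====
-- occurs(d, m): does digit d occur among m's octal digits? (Source B's inner while loop)
def occursOct (d m : Int) : Bool :=
  if m > 0 then
    if PySem.Int.mod m 8 == d then true
    else occursOct d (PySem.Int.floordiv m 8)
  else false
termination_by m.toNat
decreasing_by
  simp only [PySem.Int.floordiv]
  rw [Int.fdiv_eq_ediv]; simp only [show ((0:Int) ≤ 8 ∨ (8:Int) ∣ _) from Or.inl (by norm_num), if_pos]
  omega

def eight_alt (n : Int) : Bool :=
  if n ≤ 0 then true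
  else (!occursOct (PySem.Int.mod n 8) (PySem.Int.floordiv n 8))
       && eight_alt (PySem.Int.floordiv n 8)
termination_by n.toNat
decreasing_by
  simp only [PySem.Int.floordiv]
  rw [Int.fdiv_eq_ediv]; simp only [show ((0:Int) ≤ 8 ∨ (8:Int) ∣ _) from Or.inl (by norm_num), if_pos]
  omega

-- ===== PRECONDITION & SPEC =====
def Spec_eight (n : Int) (out : Bool) : Prop := out = eight_alt n
instance (n : Int) (out : Bool) : Decidable (Spec_eight n out) := by unfold Spec_eight; infer_instance

-- ===== CLAIM (what is proved, stated in full; the proofs are below) =====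
def Claim_equal_eight : Prop := ∀ (n : Int), Dom_eight n → Spec_eight n (eight n)

-- ===== LEMMAS AND PROOFS =====

-- the octal digits of n, least significant first (proof-side helper)
def pvDigits (n : Int) : List Int :=
  if n > 0 then PySem.Int.mod n 8 :: pvDigits (PySem.Int.floordiv n 8) else []
termination_by n.toNat
decreasing_by
  simp only [PySem.Int.floordiv]
  rw [Int.fdiv_eq_ediv]; simp only [show ((0:Int) ≤ 8 ∨ (8:Int) ∣ _) from Or.inl (by norm_num), if_pos]
  omega

lemma pvFd (n : Int) : PySem.Int.floordiv n 8 = n / 8 := by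
  rw [PySem.Int.floordiv, Int.fdiv_eq_ediv]; simp

lemma pvFm (n : Int) : PySem.Int.mod n 8 = n % 8 := by
  rw [PySem.Int.mod, Int.fmod_eq_emod]; simp

lemma pvDigits_mem_range : ∀ (k : Nat) (n : Int), n.toNat ≤ k →
    ∀ d ∈ pvDigits n, 0 ≤ d ∧ d < 8 := by
  intro k
  induction k with
  | zero =>
    intro n hn d hd
    rw [pvDigits] at hd
    rw [if_neg (by omega)] at hd
    simp at hd
  | succ k ih =>
    intro n hn d hd
    rw [pvDigits] at hd
    by_cases h : n > 0
    · rw [if_pos h] at hd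
      rcases List.mem_cons.mp hd with h1 | h2
      · subst h1; rw [pvFm]; omega
      · exact ih (PySem.Int.floordiv n 8) (by rw [pvFd]; omega) d h2
    · rw [if_neg h] at hd; simp at hd

lemma occursOct_iff : ∀ (k : Nat) (m : Int), m.toNat ≤ k →
    ∀ d, (occursOct d m = true ↔ d ∈ pvDigits m) := by
  intro k
  induction k with
  | zero =>
    intro m hm d
    rw [occursOct, pvDigits, if_neg (by omega), if_neg (by omega)]
    simp
  | succ k ih =>
    intro m hm d
    rw [occursOct, pvDigits]
    by_cases h : m > 0
    · rw [if_pos h, if_pos h]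
      by_cases he : PySem.Int.mod m 8 = d
      · rw [if_pos (by simpa using he)]
        simp only [List.mem_cons, true_iff]
        exact Or.inl he.symm
      · rw [if_neg (by simpa using he)]
        rw [ih (PySem.Int.floordiv m 8) (by rw [pvFd]; omega) d]
        simp only [List.mem_cons]
        constructor
        · exact Or.inr
        · rintro (h1 | h2)
          · exact absurd h1.symm he
          · exact h2
    · rw [if_neg h, if_neg h]; simp

lemma eight_alt_true_iff : ∀ (k : Nat) (n : Int), n.toNat ≤ k →
    (eight_alt n = true ↔ (pvDigits n).Nodup) := by
  intro k
  induction k with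
  | zero =>
    intro n hn
    rw [eight_alt, pvDigits, if_pos (by omega), if_neg (by omega)]
    simp
  | succ k ih =>
    intro n hn
    rw [eight_alt, pvDigits]
    by_cases h : n > 0
    · rw [if_neg (by omega), if_pos h]
      rw [Bool.and_eq_true, Bool.not_eq_eq_eq_not, Bool.not_true,
          List.nodup_cons, ih (PySem.Int.floordiv n 8) (by rw [pvFd]; omega)]
      constructor
      · rintro ⟨hocc, hnd⟩
        refine ⟨fun hmem => ?_, hnd⟩
        rw [← occursOct_iff (PySem.Int.floordiv n 8).toNat _ le_rfl] at hmem
        rw [hmem] at hocc; exact absurd hocc (by simp)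
      · rintro ⟨hmem, hnd⟩
        refine ⟨?_, hnd⟩
        cases hocc : occursOct (PySem.Int.mod n 8) (PySem.Int.floordiv n 8)
        · rfl
        · exact absurd ((occursOct_iff _ _ le_rfl _).mp hocc) hmem
    · rw [if_pos (by omega), if_neg h]; simp

lemma eightLoop_true_iff : ∀ (k : Nat) (n : Int), n.toNat ≤ k →
    ∀ tab : List Int, tab.length = 8 → (∀ i, 0 ≤ tab.getD i 0) →
    (eightLoop tab n = true ↔
      (pvDigits n).Nodup ∧ ∀ d ∈ pvDigits n, tab.getD d.toNat 0 = 0) := by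
  intro k
  induction k with
  | zero =>
    intro n hn tab _ _
    rw [eightLoop, pvDigits, if_neg (by omega), if_neg (by omega)]
    simp
  | succ k ih =>
    intro n hn tab htl htn
    rw [eightLoop, pvDigits]
    by_cases h : n > 0
    · rw [if_pos h, if_pos h]
      have hdvr : 0 ≤ PySem.Int.mod n 8 ∧ PySem.Int.mod n 8 < 8 := by
        rw [pvFm]; omega
      set dv := PySem.Int.mod n 8 with hdv
      have hidx : dv.toNat < tab.length := by rw [htl]; omega
      set tab' := tab.set dv.toNat (tab.getD dv.toNat 0 + 1) with htab'
      have hget : tab'.getD dv.toNat 0 = tab.getD dv.toNat 0 + 1 := by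
        simp [htab', List.getD_eq_getElem?_getD, hidx]
      rw [hget]
      by_cases hc : tab.getD dv.toNat 0 + 1 > 1
      · rw [if_pos hc]
        have h0 : tab.getD dv.toNat 0 ≠ 0 := by omega
        simp only [Bool.false_eq_true, false_iff, not_and]
        intro _ hall
        exact h0 (hall dv (List.mem_cons_self))
      · rw [if_neg hc]
        have h0 : tab.getD dv.toNat 0 = 0 := by have := htn dv.toNat; omega
        have htl' : tab'.length = 8 := by simp [htab', htl]
        have hget' : ∀ d : Int, 0 ≤ d → d < 8 → d ≠ dv →
            tab'.getD d.toNat 0 = tab.getD d.toNat 0 := by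
          intro d hd0 hd8 hde
          have hne : dv.toNat ≠ d.toNat := by omega
          simp [htab', List.getD_eq_getElem?_getD, hne]
        have htn' : ∀ i, 0 ≤ tab'.getD i 0 := by
          intro i
          by_cases hie : i = dv.toNat
          · subst hie; rw [hget]; have := htn dv.toNat; omega
          · have heq : tab'.getD i 0 = tab.getD i 0 := by
              have hne : dv.toNat ≠ i := fun hh => hie hh.symm
              simp [htab', List.getD_eq_getElem?_getD, hne]
            rw [heq]; exact htn i
        rw [ih (PySem.Int.floordiv n 8) (by rw [pvFd]; omega) tab' htl' htn']
        have hrest := pvDigits_mem_range (PySem.Int.floordiv n 8).toNat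
            (PySem.Int.floordiv n 8) le_rfl
        constructor
        · rintro ⟨hnd, hall⟩
          have hdvnot : dv ∉ pvDigits (PySem.Int.floordiv n 8) := by
            intro hmem
            have := hall dv hmem
            rw [hget] at this
            omega
          refine ⟨List.Nodup.cons hdvnot hnd, ?_⟩
          intro d hd
          rcases List.mem_cons.mp hd with h1 | h2
          · subst h1; exact h0
          · have hr := hrest d h2
            have hde : d ≠ dv := by rintro rfl; exact hdvnot h2
            have := hall d h2
            rwa [hget' d hr.1 hr.2 hde] at this
        · rintro ⟨hnd, hall⟩
          have hdvnot : dv ∉ pvDigits (PySem.Int.floordiv n 8) :=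
            (List.nodup_cons.mp hnd).1
          refine ⟨(List.nodup_cons.mp hnd).2, ?_⟩
          intro d hd
          have hr := hrest d hd
          rw [hget' d hr.1 hr.2 (by rintro rfl; exact hdvnot hd)]
          exact hall d (List.mem_cons_of_mem _ hd)
    · rw [if_neg h, if_neg h]; simp

lemma eight_true_iff (n : Int) : eight n = true ↔ (pvDigits n).Nodup := by
  unfold eight
  rw [eightLoop_true_iff n.toNat n le_rfl [0,0,0,0,0,0,0,0] (by rfl)
      (by intro i; rcases i with _|_|_|_|_|_|_|_|i <;>
          simp [List.getD_eq_getElem?_getD])]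
  constructor
  · exact fun h => h.1
  · intro h
    refine ⟨h, fun d hd => ?_⟩
    obtain ⟨h1, h2⟩ := pvDigits_mem_range n.toNat n le_rfl d hd
    interval_cases d <;> rfl

-- ===== VERDICT (by name: the statement is the Claim_ definition above) =====
theorem eight_spec : Claim_equal_eight := by
  intro n _
  unfold Spec_eight
  have hA := eight_true_iff n
  have hB := eight_alt_true_iff n.toNat n le_rfl
  cases hEA : eight n <;> cases hEB : eight_alt n <;> simp_all
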